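-- pv_equiv track=rewrite | github.com/TB-AD/TB-Bench | evaluation/evaluate_functions.py | ego_turning_score
-- ===== SOURCE A (Python) =====
-- def ego_turning_score(pred, short_gt):
--     right_turn_list = ['executed a precise right-turn maneuver','right turn']
--     left_turn_list = ['executed a precise left-turn maneuver','left turn']
--     go_straight_list = ['proceeds directly ahead','go straight', 'proceeds in a linear trajectory']
--
--     right_turn_matches = 1 if sum(word in pred for word in right_turn_list) >= 1 else 0
--     left_turn_matches = 1 if sum(word in pred for word in left_turn_list) >= 1 else 0
--     go_straight_matches = 1 if sum(word in pred for word in go_straight_list) >= 1 else 0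
--
--     total_matches = right_turn_matches + left_turn_matches + go_straight_matches
--     # Check for cheating or multiple matches
--     if total_matches != 1:
--         return 0  # Multiple matches or no match indicates cheating or incorrect prediction
--
--     if short_gt == 'right_turn':
--         return 1 if right_turn_matches == 1 else 0
--     elif short_gt == 'left_turn':
--         return 1 if left_turn_matches == 1 else 0
--     elif short_gt == 'go_straight':
--         return 1 if go_straight_matches == 1 else 0
--     return 0
-- ===== SOURCE B (Python) =====
-- _PHRASES = [
--     ('right_turn', 'executed a precise right-turn maneuver'),
--     ('right_turn', 'right turn'),
--     ('left_turn', 'executed a precise left-turn maneuver'),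
--     ('left_turn', 'left turn'),
--     ('go_straight', 'proceeds directly ahead'),
--     ('go_straight', 'go straight'),
--     ('go_straight', 'proceeds in a linear trajectory'),
-- ]
--
-- def ego_turning_score(pred, short_gt):
--     # Single left-to-right scan of pred: at each position record which category
--     # has a phrase starting there, then compare the matched-label set to {short_gt}.
--     matched = set()
--     for i in range(len(pred)):
--         for label, phrase in _PHRASES:
--             if pred.startswith(phrase, i):
--                 matched.add(label)
--     return 1 if matched == {short_gt} else 0
-- ===== Notes on version B (the rewrite author's own statement) =====
-- stated objective: alternative
-- what changed: Instead of seven independent substring-membership tests with three named flags, a total_matches counter and an if/elif cascade, B makes one left-to-right scan over the positions of pred, recording at each position which category has a phrase starting there into a matched-label set, and returns 1 iff that set equals {short_gt}.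
import Mathlib
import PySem

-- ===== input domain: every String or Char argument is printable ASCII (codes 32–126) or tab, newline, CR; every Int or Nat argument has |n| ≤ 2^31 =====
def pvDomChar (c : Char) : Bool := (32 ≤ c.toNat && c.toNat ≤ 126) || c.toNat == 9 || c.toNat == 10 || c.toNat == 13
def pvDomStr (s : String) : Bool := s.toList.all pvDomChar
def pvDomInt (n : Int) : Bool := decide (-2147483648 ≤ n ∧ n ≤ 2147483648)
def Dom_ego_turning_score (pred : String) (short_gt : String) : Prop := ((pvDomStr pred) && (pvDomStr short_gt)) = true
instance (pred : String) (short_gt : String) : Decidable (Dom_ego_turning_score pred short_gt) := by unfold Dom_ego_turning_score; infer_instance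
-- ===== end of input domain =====

-- B replaces A's seven independent substring-membership tests, three named flags,
-- total_matches counter and if/elif cascade by a single left-to-right scan of pred
-- (at each position it records which category has a phrase starting there, building
-- the matched-label set) followed by one set-equality test against {short_gt}
-- (objective: alternative).

-- ===== PORT A =====
def ego_turning_score (pred : String) (short_gt : String) : Int :=
  let right_turn_list := ["executed a precise right-turn maneuver", "right turn"]
  let left_turn_list := ["executed a precise left-turn maneuver", "left turn"]
  let go_straight_list := ["proceeds directly ahead", "go straight", "proceeds in a linear trajectory"]
  let right_turn_matches : Int :=
    if (right_turn_list.map (fun w => if PySem.Str.isIn w pred then (1 : Int) else 0)).sum ≥ 1 then 1 else 0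
  let left_turn_matches : Int :=
    if (left_turn_list.map (fun w => if PySem.Str.isIn w pred then (1 : Int) else 0)).sum ≥ 1 then 1 else 0
  let go_straight_matches : Int :=
    if (go_straight_list.map (fun w => if PySem.Str.isIn w pred then (1 : Int) else 0)).sum ≥ 1 then 1 else 0
  let total_matches := right_turn_matches + left_turn_matches + go_straight_matches
  if total_matches ≠ 1 then 0
  else if short_gt == "right_turn" then (if right_turn_matches == 1 then 1 else 0)
  else if short_gt == "left_turn" then (if left_turn_matches == 1 then 1 else 0)
  else if short_gt == "go_straight" then (if go_straight_matches == 1 then 1 else 0)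
  else 0

-- ===== PORT B =====
def pvPhrases : List (String × String) :=
  [("right_turn", "executed a precise right-turn maneuver"),
   ("right_turn", "right turn"),
   ("left_turn", "executed a precise left-turn maneuver"),
   ("left_turn", "left turn"),
   ("go_straight", "proceeds directly ahead"),
   ("go_straight", "go straight"),
   ("go_straight", "proceeds in a linear trajectory")]

-- pred.startswith(phrase, i) with 0 ≤ i < len(pred) is exactly
-- PySem.Chars.startswith (pred.toList.drop i.toNat) phrase.toList (i comes from range(len(pred)), so i ≥ 0).
def ego_turning_score_alt (pred : String) (short_gt : String) : Int :=
  let s := pred.toList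
  let matched : PySem.Set String :=
    (PySem.List.pyRange 0 (s.length : Int)).foldl
      (fun acc i => pvPhrases.foldl
        (fun a lp => if PySem.Chars.startswith (s.drop i.toNat) lp.2.toList then PySem.Set.add a lp.1 else a)
        acc)
      PySem.Set.empty
  if PySem.Set.equal matched (PySem.Set.ofList [short_gt]) then 1 else 0

-- ===== PRECONDITION & SPEC =====
def Spec_ego_turning_score (pred : String) (short_gt : String) (out : Int) : Prop := out = ego_turning_score_alt pred short_gt
instance (pred : String) (short_gt : String) (out : Int) : Decidable (Spec_ego_turning_score pred short_gt out) := by unfold Spec_ego_turning_score; infer_instance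

-- ===== CLAIM =====
def Claim_equal_ego_turning_score : Prop := ∀ (pred : String) (short_gt : String), Dom_ego_turning_score pred short_gt → Spec_ego_turning_score pred short_gt (ego_turning_score pred short_gt)

-- ===== LEMMAS AND PROOFS =====

-- membership in B's inner per-position fold over the phrase table
lemma pv_mem_inner (cond : String × String → Bool) (l : List (String × String))
    (acc : PySem.Set String) (y : String) :
    y ∈ l.foldl (fun a lp => if cond lp then PySem.Set.add a lp.1 else a) acc ↔
      y ∈ acc ∨ ∃ lp ∈ l, cond lp = true ∧ y = lp.1 := by
  induction l generalizing acc with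
  | nil => simp
  | cons hd tl ih =>
    simp only [List.foldl_cons]
    by_cases h : cond hd = true
    · rw [if_pos h, ih]
      simp only [PySem.Set.mem_add, List.mem_cons]
      constructor
      · rintro (⟨hy | rfl⟩ | ⟨lp, hlp, hc, rfl⟩)
        · exact Or.inl hy
        · exact Or.inr ⟨hd, Or.inl rfl, h, rfl⟩
        · exact Or.inr ⟨lp, Or.inr hlp, hc, rfl⟩
      · rintro (hy | ⟨lp, (rfl | hlp), hc, rfl⟩)
        · exact Or.inl (Or.inl hy)
        · exact Or.inl (Or.inr rfl)
        · exact Or.inr ⟨lp, hlp, hc, rfl⟩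
    · rw [if_neg h, ih]
      simp only [List.mem_cons]
      constructor
      · rintro (hy | ⟨lp, hlp, hc, rfl⟩)
        · exact Or.inl hy
        · exact Or.inr ⟨lp, Or.inr hlp, hc, rfl⟩
      · rintro (hy | ⟨lp, (rfl | hlp), hc, rfl⟩)
        · exact Or.inl hy
        · exact absurd hc h
        · exact Or.inr ⟨lp, hlp, hc, rfl⟩

-- membership in B's outer scan over the positions of pred
lemma pv_mem_scan (s : List Char) (l : List Int) (acc : PySem.Set String) (y : String) :
    y ∈ l.foldl
        (fun acc i => pvPhrases.foldl
          (fun a lp => if PySem.Chars.startswith (s.drop i.toNat) lp.2.toList then PySem.Set.add a lp.1 else a)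
          acc) acc ↔
      y ∈ acc ∨ ∃ i ∈ l, ∃ lp ∈ pvPhrases,
        PySem.Chars.startswith (s.drop i.toNat) lp.2.toList = true ∧ y = lp.1 := by
  induction l generalizing acc with
  | nil => simp
  | cons hd tl ih =>
    simp only [List.foldl_cons, List.mem_cons]
    rw [ih, pv_mem_inner]
    constructor
    · rintro ((hy | ⟨lp, hlp, hc, rfl⟩) | ⟨i, hi, lp, hlp, hc, rfl⟩)
      · exact Or.inl hy
      · exact Or.inr ⟨hd, Or.inl rfl, lp, hlp, hc, rfl⟩
      · exact Or.inr ⟨i, Or.inr hi, lp, hlp, hc, rfl⟩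
    · rintro (hy | ⟨i, (rfl | hi), lp, hlp, hc, rfl⟩)
      · exact Or.inl (Or.inl hy)
      · exact Or.inl (Or.inr ⟨lp, hlp, hc, rfl⟩)
      · exact Or.inr ⟨i, hi, lp, hlp, hc, rfl⟩

-- a nonempty phrase starts at some scanned position iff it is a substring
lemma pv_exists_pos (s p : List Char) (hp : p ≠ []) :
    (∃ i ∈ PySem.List.pyRange 0 (s.length : Int),
        PySem.Chars.startswith (s.drop i.toNat) p = true) ↔ PySem.Chars.isIn p s = true := by
  rw [← PySem.Chars.exists_prefix_drop_iff_isIn]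
  constructor
  · rintro ⟨i, _, hsw⟩
    exact ⟨i.toNat, (PySem.Chars.startswith_iff _ _).1 hsw⟩
  · rintro ⟨j, hpre⟩
    by_cases hj : j < s.length
    · refine ⟨(j : Int), PySem.List.mem_pyRange_one.2 ⟨Int.natCast_nonneg j, by exact_mod_cast hj⟩, ?_⟩
      rw [PySem.Chars.startswith_iff]
      simpa using hpre
    · exfalso
      rw [List.drop_eq_nil_of_le (by omega)] at hpre
      exact hp (List.prefix_nil.mp hpre)

lemma pv_phrases_ne_nil : ∀ lp ∈ pvPhrases, lp.2.toList ≠ [] := by decide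

-- B computed in closed form: 1 iff the matched-label set is exactly {short_gt}
lemma pv_alt_eq (pred short_gt : String) :
    ego_turning_score_alt pred short_gt =
      if (∃ lp ∈ pvPhrases, PySem.Str.isIn lp.2 pred = true ∧ lp.1 = short_gt) ∧
         (∀ lp ∈ pvPhrases, PySem.Str.isIn lp.2 pred = true → lp.1 = short_gt)
      then 1 else 0 := by
  simp only [ego_turning_score_alt, PySem.Str.isIn]
  have key : ∀ y : String,
      (y ∈ (PySem.List.pyRange 0 (pred.toList.length : Int)).foldl
        (fun acc i => pvPhrases.foldl
          (fun a lp => if PySem.Chars.startswith (pred.toList.drop i.toNat) lp.2.toList then PySem.Set.add a lp.1 else a)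
          acc) PySem.Set.empty) ↔
      (∃ lp ∈ pvPhrases, PySem.Chars.isIn lp.2.toList pred.toList = true ∧ y = lp.1) := by
    intro y
    rw [pv_mem_scan]
    simp only [PySem.Set.empty, List.not_mem_nil, false_or]
    constructor
    · rintro ⟨i, hi, lp, hlp, hc, rfl⟩
      exact ⟨lp, hlp, (pv_exists_pos _ _ (pv_phrases_ne_nil lp hlp)).1 ⟨i, hi, hc⟩, rfl⟩
    · rintro ⟨lp, hlp, hin, rfl⟩
      obtain ⟨i, hi, hc⟩ := (pv_exists_pos _ _ (pv_phrases_ne_nil lp hlp)).2 hin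
      exact ⟨i, hi, lp, hlp, hc, rfl⟩
  have hmem1 : ∀ x : String, x ∈ PySem.Set.ofList [short_gt] ↔ x = short_gt := by
    intro x
    rw [PySem.Set.mem_ofList]
    exact List.mem_singleton
  split_ifs with hc hb hb
  · rfl
  · -- the set equality holds, so the bounded condition must hold
    exfalso
    apply hb
    have h := (PySem.Set.equal_iff _ _).1 hc
    constructor
    · obtain ⟨lp, hlp, hP, he⟩ := (key short_gt).1 ((h short_gt).2 ((hmem1 short_gt).2 rfl))
      exact ⟨lp, hlp, hP, he.symm⟩
    · intro lp hlp hP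
      exact (hmem1 lp.1).1 ((h lp.1).1 ((key lp.1).2 ⟨lp, hlp, hP, rfl⟩))
  · -- the bounded condition holds, so the set equality must hold
    exfalso
    apply hc
    rw [PySem.Set.equal_iff]
    intro x
    rw [key x, hmem1 x]
    obtain ⟨⟨lp0, h0, hP0, he0⟩, hall⟩ := hb
    constructor
    · rintro ⟨lp, hlp, hP, rfl⟩
      exact hall lp hlp hP
    · rintro rfl
      exact ⟨lp0, h0, hP0, he0.symm⟩
  · rfl

-- ===== VERDICT (by name: the statement is the Claim_ definition above) =====
set_option maxHeartbeats 2000000 in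
set_option maxRecDepth 16384 in
theorem ego_turning_score_spec : Claim_equal_ego_turning_score := by
  intro pred short_gt _
  unfold Spec_ego_turning_score
  rw [pv_alt_eq]
  unfold ego_turning_score pvPhrases
  obtain h1 | h1 := Bool.eq_false_or_eq_true (PySem.Str.isIn "executed a precise right-turn maneuver" pred) <;>
  obtain h2 | h2 := Bool.eq_false_or_eq_true (PySem.Str.isIn "right turn" pred) <;>
  obtain h3 | h3 := Bool.eq_false_or_eq_true (PySem.Str.isIn "executed a precise left-turn maneuver" pred) <;>
  obtain h4 | h4 := Bool.eq_false_or_eq_true (PySem.Str.isIn "left turn" pred) <;>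
  obtain h5 | h5 := Bool.eq_false_or_eq_true (PySem.Str.isIn "proceeds directly ahead" pred) <;>
  obtain h6 | h6 := Bool.eq_false_or_eq_true (PySem.Str.isIn "go straight" pred) <;>
  obtain h7 | h7 := Bool.eq_false_or_eq_true (PySem.Str.isIn "proceeds in a linear trajectory" pred) <;>
  simp at h1 h2 h3 h4 h5 h6 h7 <;>
  simp only [h1, h2, h3, h4, h5, h6, h7, List.map, List.sum_cons, List.sum_nil] <;>
  norm_num [h1, h2, h3, h4, h5, h6, h7] <;>
  · by_cases hg1 : short_gt = "right_turn"
    · subst hg1; simp [h1, h2, h3, h4, h5, h6, h7]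
    by_cases hg2 : short_gt = "left_turn"
    · subst hg2; simp [h1, h2, h3, h4, h5, h6, h7]
    by_cases hg3 : short_gt = "go_straight"
    · subst hg3; simp [h1, h2, h3, h4, h5, h6, h7]
    simp [h1, h2, h3, h4, h5, h6, h7, hg1, hg2, hg3, eq_comm]
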